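-- pv_equiv track=rewrite | github.com/panditsa/wave | wave_lang/kernel/wave/utils/mapping_utils.py | get_dict_with_updated_key
-- ===== SOURCE A (Python) =====
-- from typing import TypeVar
--
-- K = TypeVar("K")  # Key type
--
-- V = TypeVar("V")  # Value type
--
-- def get_dict_with_updated_key(
--     original_dict: dict[K, V], old_key: K, new_key: K
-- ) -> dict[K, V]:
--     """
--     Update a key in a dictionary while preserving the original insertion order of values.
--
--     Creates a new dictionary identical to the original except that the specified old key
--     is replaced with the new key. All values and ordering remain unchanged.
--     """
--     if old_key not in original_dict:
--         raise KeyError(f"Old key '{old_key}' not found in dictionary")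
--     if new_key in original_dict and new_key != old_key:
--         raise KeyError(f"New key '{new_key}' already exists in dictionary")
--
--     # Create a new dictionary with the same order but updated key
--     new_dict = {}
--     for key, value in original_dict.items():
--         if key == old_key:
--             new_dict[new_key] = value
--         else:
--             new_dict[key] = value
--
--     return new_dict
-- ===== SOURCE B (Python) =====
-- def get_dict_with_updated_key(original_dict, old_key, new_key):
--     if old_key not in original_dict:
--         raise KeyError(f"Old key '{old_key}' not found in dictionary")
--     if new_key in original_dict and new_key != old_key:
--         raise KeyError(f"New key '{new_key}' already exists in dictionary")
--
--     # Locate old_key, then splice: copy the prefix and suffix wholesale and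
--     # insert the renamed entry at the found position (no per-element branch).
--     items = list(original_dict.items())
--     i = next(j for j, (k, _) in enumerate(items) if k == old_key)
--     return dict(items[:i] + [(new_key, items[i][1])] + items[i + 1:])
-- ===== Notes on version B (the rewrite author's own statement) =====
-- stated objective: alternative
-- what changed: Replaces A's full-scan loop that branches on every item while inserting into a fresh dict by a locate-then-splice construction: a search that stops at old_key's position, then wholesale slice copies of the untouched prefix and suffix around the single renamed entry.
import Mathlib
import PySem

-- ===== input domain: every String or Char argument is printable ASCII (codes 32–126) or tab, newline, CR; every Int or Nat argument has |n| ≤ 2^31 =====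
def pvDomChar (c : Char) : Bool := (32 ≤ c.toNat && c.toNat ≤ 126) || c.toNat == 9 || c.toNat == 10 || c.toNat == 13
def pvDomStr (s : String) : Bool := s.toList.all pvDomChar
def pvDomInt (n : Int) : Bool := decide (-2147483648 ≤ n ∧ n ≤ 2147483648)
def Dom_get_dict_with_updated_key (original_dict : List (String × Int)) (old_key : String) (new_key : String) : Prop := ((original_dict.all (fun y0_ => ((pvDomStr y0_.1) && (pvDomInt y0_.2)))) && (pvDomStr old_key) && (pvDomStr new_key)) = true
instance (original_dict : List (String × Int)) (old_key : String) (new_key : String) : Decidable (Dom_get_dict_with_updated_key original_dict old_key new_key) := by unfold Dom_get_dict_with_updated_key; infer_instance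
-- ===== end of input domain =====

-- B replaces A's full-scan branch-per-item rebuild by locate-then-splice:
-- find old_key's position, then concatenate the untouched prefix, the renamed entry, and the untouched suffix.


-- ===== PORT A =====
-- transliteration of A: two KeyError guards (raise → outside Pre_, dummy []), then a loop
-- inserting each (key, value) into a fresh dict, branching on key == old_key.
def get_dict_with_updated_key (original_dict : List (String × Int)) (old_key : String) (new_key : String) : List (String × Int) :=
  if ((original_dict.map Prod.fst).contains old_key) = false then []   -- raise KeyError (old key not found)
  else if ((original_dict.map Prod.fst).contains new_key && new_key != old_key) = true then []   -- raise KeyError (new key exists)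
  else
    (original_dict.foldl
      (fun nd p => if p.1 == old_key then nd.insert new_key p.2 else nd.insert p.1 p.2)
      (PySem.Dict.empty : PySem.Dict String Int)).items

-- ===== PORT B =====
-- transliteration of Source B: same guards, then i = next(j for j,(k,_) in enumerate(items) if k == old_key)
-- (first index whose key is old_key), and dict(items[:i] + [(new_key, items[i][1])] + items[i+1:]).
def get_dict_with_updated_key_alt (original_dict : List (String × Int)) (old_key : String) (new_key : String) : List (String × Int) :=
  if ((original_dict.map Prod.fst).contains old_key) = false then []   -- raise KeyError (old key not found)
  else if ((original_dict.map Prod.fst).contains new_key && new_key != old_key) = true then []   -- raise KeyError (new key exists)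
  else
    match original_dict.findIdx? (fun p => p.1 == old_key) with
    | none => []   -- unreachable under the first guard (next() would raise StopIteration)
    | some i =>
      match PySem.List.pyGet? original_dict (i : Int) with
      | none => []   -- unreachable: i is a valid index
      | some pi =>
        (PySem.Dict.ofList
          (PySem.List.slice original_dict none (some (i : Int))
            ++ [(new_key, pi.2)]
            ++ PySem.List.slice original_dict (some ((i : Int) + 1)) none)).items

-- ===== PRECONDITION & SPEC =====
-- Pre_ excludes exactly (a) the inputs where A raises KeyError (old_key absent, or new_key
-- present and different from old_key), and (b) association lists with duplicate keys, which do
-- not represent any Python dict (the argument's type in Python).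
def Pre_get_dict_with_updated_key (original_dict : List (String × Int)) (old_key : String) (new_key : String) : Prop :=
  (original_dict.map Prod.fst).Nodup ∧ old_key ∈ original_dict.map Prod.fst ∧
    (new_key ∉ original_dict.map Prod.fst ∨ new_key = old_key)
instance (original_dict : List (String × Int)) (old_key : String) (new_key : String) : Decidable (Pre_get_dict_with_updated_key original_dict old_key new_key) := by unfold Pre_get_dict_with_updated_key; infer_instance

def pvWitness_get_dict_with_updated_key : (List (String × Int)) × String × String := ([("a", 1), ("b", 2)], "a", "c")

def Spec_get_dict_with_updated_key (original_dict : List (String × Int)) (old_key : String) (new_key : String) (out : List (String × Int)) : Prop := out = get_dict_with_updated_key_alt original_dict old_key new_key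
instance (original_dict : List (String × Int)) (old_key : String) (new_key : String) (out : List (String × Int)) : Decidable (Spec_get_dict_with_updated_key original_dict old_key new_key out) := by unfold Spec_get_dict_with_updated_key; infer_instance

-- ===== CLAIM (what is proved, stated in full; the proofs are below) =====
def Claim_equal_get_dict_with_updated_key : Prop := ∀ (original_dict : List (String × Int)) (old_key : String) (new_key : String), Dom_get_dict_with_updated_key original_dict old_key new_key → Pre_get_dict_with_updated_key original_dict old_key new_key → Spec_get_dict_with_updated_key original_dict old_key new_key (get_dict_with_updated_key original_dict old_key new_key)

-- ===== LEMMAS AND PROOFS =====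

-- splicing the renamed entry at old_key's position equals the per-element replacement map
theorem splice_eq_map (items : List (String × Int)) (old new : String) (i : Nat) (pi : String × Int)
    (hnd : (items.map Prod.fst).Nodup)
    (hfi : items.findIdx? (fun p => p.1 == old) = some i)
    (hget : items[i]? = some pi) :
    items.take i ++ [(new, pi.2)] ++ items.drop (i + 1)
      = items.map (fun p => if p.1 == old then (new, p.2) else p) := by
  induction items generalizing i with
  | nil => simp [List.findIdx?, List.findIdx?.go] at hfi
  | cons h t ih =>
    rcases List.nodup_cons.mp hnd with ⟨hht, hndt⟩
    by_cases hk : h.1 = old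
    · have hkb : (h.1 == old) = true := by simp [hk]
      have hfi0 : i = 0 := by
        rw [List.findIdx?_cons, hkb] at hfi
        simp at hfi
        omega
      subst hfi0
      simp at hget
      subst hget
      have htail : ∀ p ∈ t, (if p.1 == old then ((new, p.2) : String × Int) else p) = p := by
        intro p hp
        have hpo : (p.1 == old) = false := by
          refine beq_eq_false_iff_ne.mpr fun he => hht ?_
          rw [hk, ← he]
          exact List.mem_map_of_mem hp
        rw [hpo]
        simp
      simp only [List.take_zero, List.nil_append, List.drop_succ_cons, List.drop_zero,
        List.map_cons, hkb, if_true, List.singleton_append]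
      congr 1
      exact ((List.map_congr_left htail).trans (List.map_id' t)).symm
    · have hkb : (h.1 == old) = false := by simp [hk]
      rw [List.findIdx?_cons] at hfi
      simp only [hkb, Bool.false_eq_true, if_false] at hfi
      cases hj : t.findIdx? (fun p => p.1 == old) with
      | none => rw [hj] at hfi; simp at hfi
      | some j =>
        rw [hj] at hfi
        simp only [Option.map_some] at hfi
        cases hfi
        have hgt : t[j]? = some pi := by simpa using hget
        simp only [List.take, List.drop, List.map_cons, hkb, Bool.false_eq_true, if_false,
          List.cons_append]
        exact congrArg _ (ih j hndt hj hgt)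

theorem nodup_fst_map_replace (items : List (String × Int)) (old new : String)
    (hnd : (items.map Prod.fst).Nodup)
    (hnew : new ∉ items.map Prod.fst ∨ new = old) :
    ((items.map (fun p => if p.1 == old then (new, p.2) else p)).map Prod.fst).Nodup := by
  have hform : (items.map (fun p => if p.1 == old then (new, p.2) else p)).map Prod.fst
      = (items.map Prod.fst).map (fun x => if x == old then new else x) := by
    simp only [List.map_map]
    refine List.map_congr_left ?_
    intro p _
    by_cases h : p.1 = old <;> simp [h]
  rw [hform]
  rcases hnew with hnew | rfl
  · refine List.Nodup.map_on ?_ hnd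
    intro x hx y hy hxy
    by_cases hxo : x = old <;> by_cases hyo : y = old
    · rw [hxo, hyo]
    · exfalso; simp [hxo, hyo] at hxy; exact hnew (hxy ▸ hy)
    · exfalso; simp [hxo, hyo] at hxy; exact hnew (hxy ▸ hx)
    · simpa [hxo, hyo] using hxy
  · have : ∀ x ∈ items.map Prod.fst, (if x == new then new else x) = x := by
      intro x _; by_cases h : x = new <;> simp [h]
    rw [List.map_congr_left this, List.map_id']
    exact hnd

theorem get_dict_spec_aux (original_dict : List (String × Int)) (old_key new_key : String)
    (h : Pre_get_dict_with_updated_key original_dict old_key new_key) :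
    get_dict_with_updated_key original_dict old_key new_key
      = get_dict_with_updated_key_alt original_dict old_key new_key := by
  obtain ⟨hnd, hold, hnew⟩ := h
  have hc1 : ((original_dict.map Prod.fst).contains old_key) = true := by simpa using hold
  have hc2 : ((original_dict.map Prod.fst).contains new_key && new_key != old_key) = false := by
    rcases hnew with hnew | rfl
    · simp [hnew]
    · simp
  -- old_key occurs, so findIdx? finds an index
  have hsome : (original_dict.findIdx? (fun p => p.1 == old_key)).isSome = true := by
    rw [List.findIdx?_isSome]
    obtain ⟨p, hp, hpk⟩ := List.exists_of_mem_map hold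
    simp only [List.any_eq_true]
    exact ⟨p, hp, by simp [hpk]⟩
  obtain ⟨i, hfi⟩ := Option.isSome_iff_exists.mp hsome
  have hilt : i < original_dict.length := (List.findIdx?_eq_some_iff_findIdx_eq.mp hfi).1
  obtain ⟨pi, hget⟩ : ∃ pi, original_dict[i]? = some pi :=
    ⟨original_dict[i], List.getElem?_eq_getElem hilt⟩
  unfold get_dict_with_updated_key get_dict_with_updated_key_alt
  rw [hc1, hc2, hfi]
  simp only [Bool.true_eq_false, Bool.false_eq_true, if_false, PySem.List.pyGet?_natCast, hget]
  -- A side: rewrite the branching fold as a fold inserting a computed pair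
  have hfun : (fun (nd : PySem.Dict String Int) (p : String × Int) =>
        if p.1 == old_key then nd.insert new_key p.2 else nd.insert p.1 p.2)
      = fun nd p => nd.insert (if p.1 == old_key then (new_key, p.2) else p).1
                              (if p.1 == old_key then (new_key, p.2) else p).2 := by
    funext nd p
    by_cases h : p.1 == old_key <;> simp [h]
  rw [hfun]
  have hrepnd := nodup_fst_map_replace original_dict old_key new_key hnd hnew
  have hA := PySem.Dict.items_foldl_insert_fresh
      (l := original_dict)
      (k := fun p => (if p.1 == old_key then (new_key, p.2) else p).1)
      (v := fun p => (if p.1 == old_key then (new_key, p.2) else p).2)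
      (d := (PySem.Dict.empty : PySem.Dict String Int))
      (by intro a _; simp [PySem.Dict.contains_empty])
      (by
        rw [show original_dict.map (fun p => (if p.1 == old_key then (new_key, p.2) else p).1)
            = (original_dict.map (fun p => if p.1 == old_key then (new_key, p.2) else p)).map Prod.fst by
          simp [List.map_map, Function.comp]]
        exact hrepnd)
  rw [hA]
  -- B side: slices → take/drop, then the splice lemma and items of ofList on fresh keys
  rw [PySem.List.slice_to_natCast, show ((i : Int) + 1) = (((i + 1 : Nat)) : Int) by push_cast; ring,
    PySem.List.slice_from_natCast]
  rw [splice_eq_map original_dict old_key new_key i pi hnd hfi hget]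
  have hB := PySem.Dict.items_foldl_insert_fresh
      (l := original_dict.map (fun p => if p.1 == old_key then (new_key, p.2) else p))
      (k := Prod.fst) (v := Prod.snd) (d := (PySem.Dict.empty : PySem.Dict String Int))
      (by intro a _; simp [PySem.Dict.contains_empty]) hrepnd
  have hofList : (PySem.Dict.ofList
        (original_dict.map (fun p => if p.1 == old_key then (new_key, p.2) else p))).items
      = ((original_dict.map (fun p => if p.1 == old_key then (new_key, p.2) else p)).foldl
          (fun (d : PySem.Dict String Int) (p : String × Int) => d.insert p.1 p.2)
          (PySem.Dict.empty : PySem.Dict String Int)).items := rfl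
  rw [hofList, hB]
  simp [List.map_map, Function.comp]

-- ===== VERDICT (by name: the statement is the Claim_ definition above) =====
theorem get_dict_with_updated_key_spec : Claim_equal_get_dict_with_updated_key := by
  intro d old new _ hpre
  exact get_dict_spec_aux d old new hpre
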